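-- pv_equiv track=rewrite | github.com/miguelmatos-ua/ia | P01/e01.py | ex9
-- ===== SOURCE A (Python) =====
-- def ex9(lst1, lst2):
--     if not lst1:
--         return lst2[:]
--     if not lst2:
--         return lst1[:]
--     if lst1[0] != lst2[0]:
--         new_lst = ex9(lst1[1:], lst2)
--     else:
--         new_lst = ex9(lst1, lst2[1:])
--     new_lst[:0] = [lst1[0]]
--     return new_lst
-- ===== SOURCE B (Python) =====
-- def ex9(lst1, lst2):
--     i = j = 0
--     n, m = len(lst1), len(lst2)
--     out = []
--     while i < n and j < m:
--         out.append(lst1[i])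
--         if lst1[i] != lst2[j]:
--             i += 1
--         else:
--             j += 1
--     out.extend(lst2[j:] if i == n else lst1[i:])
--     return out
-- ===== Notes on version B (the rewrite author's own statement) =====
-- stated objective: faster
-- what changed: Replaced the recursion that copies list slices at every step with an iterative two-index scan that appends to one output list and extends with the remaining suffix on exhaustion.
import Mathlib
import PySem

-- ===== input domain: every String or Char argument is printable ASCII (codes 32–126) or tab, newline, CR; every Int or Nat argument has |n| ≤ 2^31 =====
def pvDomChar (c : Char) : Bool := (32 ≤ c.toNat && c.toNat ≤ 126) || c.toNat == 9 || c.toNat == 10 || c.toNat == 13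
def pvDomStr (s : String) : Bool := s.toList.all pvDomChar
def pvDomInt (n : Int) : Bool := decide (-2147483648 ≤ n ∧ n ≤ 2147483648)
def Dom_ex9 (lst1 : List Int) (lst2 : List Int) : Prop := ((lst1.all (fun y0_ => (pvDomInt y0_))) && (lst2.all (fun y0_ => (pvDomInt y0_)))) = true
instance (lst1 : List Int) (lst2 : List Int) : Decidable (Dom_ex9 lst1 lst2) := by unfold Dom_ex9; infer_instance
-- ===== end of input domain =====

-- B replaces A's slice-copying recursion by an iterative two-index scan (objective: faster, asymptotic).

-- ===== PORT A =====
-- literal port of A's recursion: base cases return a copy of the other list,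
-- then recurse on a tail slice and prepend lst1[0]
def ex9 (lst1 : List Int) (lst2 : List Int) : List Int :=
  match lst1, lst2 with
  | [], _ => lst2
  | _ :: _, [] => lst1
  | a :: t1, b :: t2 =>
      let new_lst := if a ≠ b then ex9 t1 (b :: t2) else ex9 (a :: t1) t2
      a :: new_lst
termination_by lst1.length + lst2.length
decreasing_by all_goals (simp; try omega)

-- ===== PORT B =====
-- literal port of B's while loop: index pointers i j, output accumulator,
-- remaining suffix appended on exhaustion
def ex9AltLoop (lst1 lst2 : List Int) (n m i j : Nat) (out : List Int) : List Int :=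
  if _ : i < n ∧ j < m then
    let x := lst1.getD i 0
    if x ≠ lst2.getD j 0 then ex9AltLoop lst1 lst2 n m (i + 1) j (out ++ [x])
    else ex9AltLoop lst1 lst2 n m i (j + 1) (out ++ [x])
  else
    out ++ (if i = n then lst2.drop j else lst1.drop i)
termination_by (n - i) + (m - j)
decreasing_by all_goals omega

def ex9_alt (lst1 : List Int) (lst2 : List Int) : List Int :=
  ex9AltLoop lst1 lst2 lst1.length lst2.length 0 0 []

-- ===== PRECONDITION & SPEC =====
def Spec_ex9 (lst1 : List Int) (lst2 : List Int) (out : List Int) : Prop := out = ex9_alt lst1 lst2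
instance (lst1 : List Int) (lst2 : List Int) (out : List Int) : Decidable (Spec_ex9 lst1 lst2 out) := by unfold Spec_ex9; infer_instance

-- ===== CLAIM (what is proved, stated in full; the proofs are below) =====
def Claim_equal_ex9 : Prop := ∀ (lst1 : List Int) (lst2 : List Int), Dom_ex9 lst1 lst2 → Spec_ex9 lst1 lst2 (ex9 lst1 lst2)

-- ===== LEMMAS AND PROOFS =====

-- A on an empty second list returns the first list
theorem ex9_nil_right (lst1 : List Int) : ex9 lst1 [] = lst1 := by
  cases lst1 <;> simp only [ex9]

-- loop invariant: the loop state (i, j, out) computes out ++ ex9 (suffixes)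
theorem ex9AltLoop_eq (lst1 lst2 : List Int) :
    ∀ (i j : Nat) (out : List Int), i ≤ lst1.length → j ≤ lst2.length →
      ex9AltLoop lst1 lst2 lst1.length lst2.length i j out
        = out ++ ex9 (lst1.drop i) (lst2.drop j) := by
  intro i j
  induction hk : (lst1.length - i) + (lst2.length - j) using Nat.strong_induction_on
    generalizing i j with
  | _ k ih =>
  intro out hi hj
  rw [ex9AltLoop]
  by_cases h : i < lst1.length ∧ j < lst2.length
  · have h1 := h.1
    have h2 := h.2
    have hd1 : lst1.drop i = lst1[i] :: lst1.drop (i + 1) := List.drop_eq_getElem_cons h1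
    have hd2 : lst2.drop j = lst2[j] :: lst2.drop (j + 1) := List.drop_eq_getElem_cons h2
    have hg1 : lst1.getD i 0 = lst1[i] := List.getD_eq_getElem _ _ h1
    have hg2 : lst2.getD j 0 = lst2[j] := List.getD_eq_getElem _ _ h2
    rw [dif_pos h]
    simp only [hg1, hg2]
    by_cases hne : lst1[i] ≠ lst2[j]
    · rw [if_pos hne,
        ih ((lst1.length - (i+1)) + (lst2.length - j)) (by omega) (i+1) j rfl _ (by omega) hj,
        hd1, hd2]
      simp only [ex9, if_pos hne, List.append_assoc, List.singleton_append]
    · rw [if_neg hne,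
        ih ((lst1.length - i) + (lst2.length - (j+1))) (by omega) i (j+1) rfl _ hi (by omega),
        hd1, hd2]
      simp only [ex9, if_neg hne, List.append_assoc, List.singleton_append]
  · rw [dif_neg h]
    rcases Nat.lt_or_ge i lst1.length with h1 | h1
    · have hj' : j = lst2.length := by omega
      have hde : lst2.drop j = [] := by simp [hj']
      rw [hde, ex9_nil_right, if_neg (by omega)]
    · have hi' : i = lst1.length := by omega
      have hde : lst1.drop i = [] := by simp [hi']
      rw [hde, if_pos hi']
      cases lst2.drop j <;> simp only [ex9]

-- ===== VERDICT (by name: the statement is the Claim_ definition above) =====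
theorem ex9_spec : Claim_equal_ex9 := by
  intro lst1 lst2 _
  unfold Spec_ex9 ex9_alt
  rw [ex9AltLoop_eq lst1 lst2 0 0 [] (Nat.zero_le _) (Nat.zero_le _)]
  simp only [List.drop_zero, List.nil_append]
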